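-- pv_equiv track=rewrite | github.com/joytianya/MailboxNameEvaluation | pattern_check.py | is_alpha_num
-- ===== SOURCE A (Python) =====
-- def is_alpha_num(s):
--     if s[0]>'z' or s[0]<'a':
--         return 0
--     alp=""
--     num=""
--     flag=0
--     flag_0=0
--     flag_1=0
--     for i in range(len(s)):
--         if flag==0:
--             if s[i]<='z' and s[i]>='a':
--                 alp+=s[i]
--             elif s[i]<='9' and s[i]>='0':
--                 flag=1
--                 num+=s[i]
--             else:
--                 flag_0=1
--                 break
--
--         else:
--             if s[i] <= '9' and s[i] >= '0':
--                 num+=s[i]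
--             else:
--                 flag_0 = 1
--                 break
--     if len(num)>0 and flag_0!=1 :
--
--         return 1
--     else:
--         return 0
-- ===== SOURCE B (Python) =====
-- def is_alpha_num(s):
--     # find the end of the leading lowercase run, then verify a nonempty digit suffix
--     i = 0
--     n = len(s)
--     while i < n and 'a' <= s[i] <= 'z':
--         i += 1
--     if 0 < i < n and all('0' <= c <= '9' for c in s[i:]):
--         return 1
--     return 0
-- ===== Notes on version B (the rewrite author's own statement) =====
-- stated objective: simpler
-- what changed: Replaces A's flag-based state machine that accumulates alpha/num substrings with a two-phase check: advance an index over the leading lowercase run, then test that the remaining suffix is nonempty and all digits.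
import Mathlib
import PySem

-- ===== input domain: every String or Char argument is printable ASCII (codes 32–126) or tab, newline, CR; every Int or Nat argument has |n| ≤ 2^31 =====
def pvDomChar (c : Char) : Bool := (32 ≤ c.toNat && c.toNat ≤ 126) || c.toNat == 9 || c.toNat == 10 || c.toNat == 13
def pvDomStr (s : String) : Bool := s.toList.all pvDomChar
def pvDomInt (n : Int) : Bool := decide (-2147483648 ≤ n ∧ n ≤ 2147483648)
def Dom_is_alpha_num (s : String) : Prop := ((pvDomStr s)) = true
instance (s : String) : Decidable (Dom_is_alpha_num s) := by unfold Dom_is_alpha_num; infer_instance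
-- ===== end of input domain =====

-- B replaces A's flag-based state machine with a simpler two-phase scan (leading lowercase run, then an all-digits suffix check); same O(n) cost.


-- ===== PORT A =====
-- the for-loop with state (alp, num, flag, flag_0); an early 'break' returns the state with flag_0 = 1
def pvALoop : List Char → List Char → List Char → Int → Int → List Char × List Char × Int × Int
  | [], alp, num, flag, flag0 => (alp, num, flag, flag0)
  | c :: rest, alp, num, flag, flag0 =>
    if flag = 0 then
      if c ≤ 'z' ∧ c ≥ 'a' then pvALoop rest (alp ++ [c]) num flag flag0
      else if c ≤ '9' ∧ c ≥ '0' then pvALoop rest alp (num ++ [c]) 1 flag0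
      else (alp, num, flag, 1)
    else
      if c ≤ '9' ∧ c ≥ '0' then pvALoop rest alp (num ++ [c]) flag flag0
      else (alp, num, flag, 1)

def is_alpha_num (s : String) : Int :=
  match PySem.Str.pyGet? s 0 with
  | none => 0   -- s[0] raises IndexError in Python: outside Pre_
  | some c0 =>
    if c0 > 'z' ∨ c0 < 'a' then 0
    else
      let st := pvALoop s.toList [] [] 0 0
      if st.2.1.length > 0 ∧ st.2.2.2 ≠ 1 then 1 else 0

-- ===== PORT B =====
def pvIsLow (c : Char) : Bool := 'a' ≤ c && c ≤ 'z'
def pvIsDig (c : Char) : Bool := '0' ≤ c && c ≤ '9'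

def is_alpha_num_alt (s : String) : Int :=
  let cs := s.toList
  let i := (cs.takeWhile pvIsLow).length        -- the while loop: end of the leading lowercase run
  if 0 < i ∧ i < cs.length ∧ (cs.drop i).all pvIsDig then 1 else 0

-- ===== PRECONDITION & SPEC =====
-- Pre_ excludes only the empty string, on which A raises IndexError at s[0]; B returns 0 there.
def Pre_is_alpha_num (s : String) : Prop := s.toList ≠ []
instance (s : String) : Decidable (Pre_is_alpha_num s) := by unfold Pre_is_alpha_num; infer_instance
def pvWitness_is_alpha_num : String := "ab12"

def Spec_is_alpha_num (s : String) (out : Int) : Prop := out = is_alpha_num_alt s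
instance (s : String) (out : Int) : Decidable (Spec_is_alpha_num s out) := by unfold Spec_is_alpha_num; infer_instance

-- ===== CLAIM (what is proved, stated in full; the proofs are below) =====
def Claim_equal_is_alpha_num : Prop := ∀ (s : String), Dom_is_alpha_num s → Pre_is_alpha_num s → Spec_is_alpha_num s (is_alpha_num s)

-- ===== LEMMAS AND PROOFS =====

-- phase 2 (flag = 1): the loop appends digits to num until a non-digit breaks with flag_0 = 1
theorem pvALoop_digits (cs : List Char) : ∀ alp num,
    pvALoop cs alp num 1 0 =
      if cs.all pvIsDig then (alp, num ++ cs, 1, 0)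
      else (alp, num ++ cs.takeWhile pvIsDig, 1, 1) := by
  induction cs with
  | nil => intro alp num; simp [pvALoop]
  | cons c rest ih =>
    intro alp num
    by_cases hd : c ≤ '9' ∧ c ≥ '0'
    · have hd' : pvIsDig c = true := by
        simp only [pvIsDig, Bool.and_eq_true, decide_eq_true_eq]; exact ⟨hd.2, hd.1⟩
      simp [pvALoop, hd, ih, hd', List.all_cons, List.takeWhile]
    · have hd' : ¬ pvIsDig c = true := by
        simp only [pvIsDig, Bool.and_eq_true, decide_eq_true_eq, not_and]
        intro h1 h2; exact hd ⟨h2, h1⟩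
      simp [pvALoop, hd, List.all_cons, hd', List.takeWhile]

-- phase 1 (flag = 0, num = ""): the loop consumes the leading lowercase run into alp,
-- then either ends, switches to phase 2 on a digit, or breaks with flag_0 = 1
theorem pvALoop_low (cs : List Char) : ∀ alp,
    pvALoop cs alp [] 0 0 =
      match cs.dropWhile pvIsLow with
      | [] => (alp ++ cs.takeWhile pvIsLow, [], 0, 0)
      | c :: rest =>
        if pvIsDig c then pvALoop rest (alp ++ cs.takeWhile pvIsLow) [c] 1 0
        else (alp ++ cs.takeWhile pvIsLow, [], 0, 1) := by
  induction cs with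
  | nil => intro alp; simp [pvALoop]
  | cons c rest ih =>
    intro alp
    by_cases hl : c ≤ 'z' ∧ c ≥ 'a'
    · have hl' : pvIsLow c = true := by
        simp only [pvIsLow, Bool.and_eq_true, decide_eq_true_eq]; exact ⟨hl.2, hl.1⟩
      simp only [pvALoop, hl, if_true, List.dropWhile_cons_of_pos hl',
        List.takeWhile_cons_of_pos hl', ih (alp ++ [c])]
      cases rest.dropWhile pvIsLow <;> simp
    · have hl' : pvIsLow c = false := by
        simp only [pvIsLow, Bool.and_eq_false_iff, decide_eq_false_iff_not, not_le]
        by_cases h1 : 'a' ≤ c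
        · exact Or.inr (not_le.mp (fun h2 => hl ⟨h2, h1⟩))
        · exact Or.inl (not_le.mp h1)
      by_cases hd : c ≤ '9' ∧ c ≥ '0'
      · have hd' : pvIsDig c = true := by
          simp only [pvIsDig, Bool.and_eq_true, decide_eq_true_eq]; exact ⟨hd.2, hd.1⟩
        simp [pvALoop, hl, hd, List.dropWhile_cons, List.takeWhile_cons, hl', hd']
      · have hd' : ¬ pvIsDig c = true := by
          simp only [pvIsDig, Bool.and_eq_true, decide_eq_true_eq, not_and]
          intro h1 h2; exact hd ⟨h2, h1⟩
        simp [pvALoop, hl, hd, List.dropWhile_cons, List.takeWhile_cons, hl', hd']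

theorem pv_drop_takeWhile_len {α : Type} (p : α → Bool) (l : List α) :
    l.drop (l.takeWhile p).length = l.dropWhile p := by
  induction l with
  | nil => simp
  | cons a l ih =>
    by_cases h : p a
    · simp [List.takeWhile_cons_of_pos h, List.dropWhile_cons_of_pos h, ih]
    · have h' : p a = false := by simp [h]
      simp [List.takeWhile_cons, List.dropWhile_cons, h']

-- ===== VERDICT (by name: the statement is the Claim_ definition above) =====
theorem is_alpha_num_spec : Claim_equal_is_alpha_num := by
  intro s _ hpre
  unfold Spec_is_alpha_num is_alpha_num is_alpha_num_alt
  cases hcs : s.toList with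
  | nil => exact absurd hcs hpre
  | cons c0 t =>
    have hget : PySem.Str.pyGet? s 0 = some c0 := by
      rw [(by norm_num : (0 : Int) = ((0 : Nat) : Int)), PySem.Str.pyGet?_natCast, hcs]; rfl
    rw [hget]
    simp only [hcs]
    by_cases hg : c0 > 'z' ∨ c0 < 'a'
    · -- first-char guard fires; B: leading lowercase run is empty
      have hl0 : pvIsLow c0 = false := by
        simp only [pvIsLow, Bool.and_eq_false_iff, decide_eq_false_iff_not, not_le]
        rcases hg with h | h
        · exact Or.inr h
        · exact Or.inl h
      simp [hg, List.takeWhile_cons, hl0]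
    · have hl0 : pvIsLow c0 = true := by
        push_neg at hg
        simp only [pvIsLow, Bool.and_eq_true, decide_eq_true_eq]; exact ⟨hg.2, hg.1⟩
      rw [if_neg hg, pvALoop_low]
      have hdrop := pv_drop_takeWhile_len pvIsLow (c0 :: t)
      have htlen : 0 < ((c0 :: t).takeWhile pvIsLow).length := by
        simp [List.takeWhile_cons_of_pos hl0]
      cases hD : (c0 :: t).dropWhile pvIsLow with
      | nil =>
        -- whole string lowercase: num stays empty, B's digit suffix is empty
        have h := List.takeWhile_append_dropWhile (p := pvIsLow) (l := c0 :: t)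
        rw [hD, List.append_nil] at h
        simp [hD, h]
      | cons d rest =>
        have hlt : ((c0 :: t).takeWhile pvIsLow).length ≤ t.length := by
          have h := List.takeWhile_append_dropWhile (p := pvIsLow) (l := c0 :: t)
          rw [hD] at h
          have := congrArg List.length h
          simp only [List.length_append, List.length_cons] at this
          omega
        rw [hdrop, hD]
        by_cases hd : pvIsDig d
        · simp only [hd, if_true, pvALoop_digits]
          by_cases hall : rest.all pvIsDig
          · simp [hall, htlen, hlt, hd]
          · simp [hall, htlen, hd]
        · simp [hd, htlen]
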